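-- pv_equiv track=rewrite | github.com/Prof-Drake-UMD/INST767-Sp25 | Yuting_Shen/src/transform/youtube_transformer.py | extract_sports_related_tags
-- ===== SOURCE A (Python) =====
-- def extract_sports_related_tags(tags, sports_keywords):
--     """
--     Extract sports-related tags from a list of video tags.
--
--     Args:
--         tags (list): List of video tags
--         sports_keywords (list): List of sports-related keywords to match
--
--     Returns:
--         list: List of sports-related tags
--     """
--     if not tags:
--         return []
--
--     sports_related = []
--     for tag in tags:
--         tag_lower = tag.lower()
--         for keyword in sports_keywords:
--             if keyword.lower() in tag_lower:
--                 sports_related.append(tag)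
--                 break
--
--     return sports_related
-- ===== SOURCE B (Python) =====
-- def extract_sports_related_tags(tags, sports_keywords):
--     # Transposed scan: outer loop over keywords, collecting the set of matching
--     # tag indices; then one indexed pass over the tags emits those in the set.
--     lowered = [t.lower() for t in tags]
--     matched = set()
--     for keyword in sports_keywords:
--         k = keyword.lower()
--         for i, tl in enumerate(lowered):
--             if k in tl:
--                 matched.add(i)
--     return [tag for i, tag in enumerate(tags) if i in matched]
-- ===== Notes on version B (the rewrite author's own statement) =====
-- stated objective: alternative
-- what changed: Transposes the loop nest: instead of per-tag scanning keywords with a break, B loops over keywords once each, collecting the set of matching tag indices over a pre-lowered tag list, then a single indexed pass emits the tags whose index is in the set.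
import Mathlib
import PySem

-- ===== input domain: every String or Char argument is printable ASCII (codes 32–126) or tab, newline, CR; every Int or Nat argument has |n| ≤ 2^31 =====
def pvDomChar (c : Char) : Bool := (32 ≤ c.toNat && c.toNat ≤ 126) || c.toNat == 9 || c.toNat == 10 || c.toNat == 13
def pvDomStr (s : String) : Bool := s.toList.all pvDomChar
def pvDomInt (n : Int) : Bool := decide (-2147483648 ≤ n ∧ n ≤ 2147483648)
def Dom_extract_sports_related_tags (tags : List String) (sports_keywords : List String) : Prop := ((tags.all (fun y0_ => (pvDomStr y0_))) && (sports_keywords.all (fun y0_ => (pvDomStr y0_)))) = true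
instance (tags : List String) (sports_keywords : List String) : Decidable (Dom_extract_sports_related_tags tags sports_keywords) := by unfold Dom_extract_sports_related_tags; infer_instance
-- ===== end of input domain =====

-- B transposes the scan: outer loop over keywords collecting a set of matching tag
-- indices, then one indexed pass over the tags emits those in the set (objective: alternative).
-- ===== PORT A =====
-- inner 'for keyword in sports_keywords: if keyword.lower() in tag_lower: append; break'
def pvAInner (acc : List String) (tag : String) (tag_lower : String) : List String → List String
  | [] => acc
  | keyword :: rest =>
      if PySem.Str.isIn (PySem.Str.lower keyword) tag_lower then acc ++ [tag]
      else pvAInner acc tag tag_lower rest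

def extract_sports_related_tags (tags : List String) (sports_keywords : List String) : List String :=
  if tags = [] then []
  else tags.foldl (fun acc tag => pvAInner acc tag (PySem.Str.lower tag) sports_keywords) []

-- ===== PORT B =====
-- 'for i, tl in enumerate(lowered): if k in tl: matched.add(i)'
def pvScan (k : String) : PySem.Set Nat → Nat → List String → PySem.Set Nat
  | m, _, [] => m
  | m, i, tl :: rest =>
      pvScan k (if PySem.Str.isIn k tl then PySem.Set.add m i else m) (i + 1) rest

-- '[tag for i, tag in enumerate(tags) if i in matched]'
def pvEmit (matched : PySem.Set Nat) : Nat → List String → List String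
  | _, [] => []
  | i, tag :: rest =>
      if PySem.Set.contains matched i then tag :: pvEmit matched (i + 1) rest
      else pvEmit matched (i + 1) rest

def extract_sports_related_tags_alt (tags : List String) (sports_keywords : List String) : List String :=
  let lowered := tags.map PySem.Str.lower
  let matched := sports_keywords.foldl
    (fun m keyword => pvScan (PySem.Str.lower keyword) m 0 lowered) PySem.Set.empty
  pvEmit matched 0 tags

-- ===== PRECONDITION & SPEC =====
def Spec_extract_sports_related_tags (tags : List String) (sports_keywords : List String) (out : List String) : Prop := out = extract_sports_related_tags_alt tags sports_keywords
instance (tags : List String) (sports_keywords : List String) (out : List String) : Decidable (Spec_extract_sports_related_tags tags sports_keywords out) := by unfold Spec_extract_sports_related_tags; infer_instance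

-- ===== CLAIM =====
def Claim_equal_extract_sports_related_tags : Prop := ∀ (tags : List String) (sports_keywords : List String), Dom_extract_sports_related_tags tags sports_keywords → Spec_extract_sports_related_tags tags sports_keywords (extract_sports_related_tags tags sports_keywords)

-- ===== LEMMAS AND PROOFS =====
-- the tag-level predicate both programs decide, per tag
def pvPred (ks : List String) (tag : String) : Bool :=
  ks.any (fun k => PySem.Str.isIn (PySem.Str.lower k) (PySem.Str.lower tag))

-- A's inner break-loop either appends the tag (some keyword matches) or leaves acc unchanged
theorem pvAInner_eq (acc : List String) (tag tl : String) (ks : List String) :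
    pvAInner acc tag tl ks =
      if ks.any (fun k => PySem.Str.isIn (PySem.Str.lower k) tl) then acc ++ [tag] else acc := by
  induction ks with
  | nil => simp [pvAInner]
  | cons k rest ih =>
      by_cases h : PySem.Chars.isIn (PySem.Chars.lower k.toList) tl.toList = true <;>
        simp [pvAInner, ih, h]

-- A's fold is a filter by pvPred
theorem pvFold_eq (tags ks : List String) (acc : List String) :
    tags.foldl (fun acc tag => pvAInner acc tag (PySem.Str.lower tag) ks) acc =
      acc ++ tags.filter (pvPred ks) := by
  induction tags generalizing acc with
  | nil => simp
  | cons t rest ih =>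
      rw [List.foldl_cons, ih, pvAInner_eq]
      by_cases h : pvPred ks t = true <;> simp_all [pvPred]

-- membership after one keyword's scan
theorem mem_pvScan (k : String) (m : PySem.Set Nat) (i : Nat) (xs : List String) (j : Nat) :
    j ∈ pvScan k m i xs ↔
      j ∈ m ∨ ∃ d : Nat, ∃ h : d < xs.length, PySem.Str.isIn k xs[d] = true ∧ j = i + d := by
  induction xs generalizing m i with
  | nil => simp [pvScan]
  | cons tl rest ih =>
      rw [pvScan, ih]
      by_cases h : PySem.Str.isIn k tl = true
      · simp only [h, if_pos, PySem.Set.mem_add]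
        constructor
        · rintro ((hm | rfl) | ⟨d, hd, hmatch, rfl⟩)
          · exact Or.inl hm
          · exact Or.inr ⟨0, by simp, by simpa using h⟩
          · exact Or.inr ⟨d + 1, by simp only [List.length_cons]; omega, by simpa using hmatch, by omega⟩
        · rintro (hm | ⟨d, hd, hmatch, rfl⟩)
          · exact Or.inl (Or.inl hm)
          · cases d with
            | zero => exact Or.inl (Or.inr (by omega))
            | succ d => exact Or.inr ⟨d, by simp only [List.length_cons] at hd; omega, by simpa using hmatch, by omega⟩
      · simp only [h, if_neg, Bool.false_eq_true, not_false_iff]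
        constructor
        · rintro (hm | ⟨d, hd, hmatch, rfl⟩)
          · exact Or.inl hm
          · exact Or.inr ⟨d + 1, by simp only [List.length_cons]; omega, by simpa using hmatch, by omega⟩
        · rintro (hm | ⟨d, hd, hmatch, rfl⟩)
          · exact Or.inl hm
          · cases d with
            | zero => simp_all
            | succ d => exact Or.inr ⟨d, by simp only [List.length_cons] at hd; omega, by simpa using hmatch, by omega⟩

-- membership in the full matched set: exactly the indices of tags satisfying pvPred
theorem mem_matched (ks : List String) (lowered : List String) (m : PySem.Set Nat) (j : Nat) :
    j ∈ ks.foldl (fun m keyword => pvScan (PySem.Str.lower keyword) m 0 lowered) m ↔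
      j ∈ m ∨ ∃ h : j < lowered.length,
        ∃ k ∈ ks, PySem.Str.isIn (PySem.Str.lower k) lowered[j] = true := by
  induction ks generalizing m with
  | nil => simp
  | cons k rest ih =>
      rw [List.foldl_cons, ih]
      rw [mem_pvScan]
      constructor
      · rintro ((hm | ⟨d, hd, hmatch, rfl⟩) | ⟨hj, kw, hkw, hmatch⟩)
        · exact Or.inl hm
        · exact Or.inr ⟨by simpa using hd, k, by simp, by simpa using hmatch⟩
        · exact Or.inr ⟨hj, kw, by simp [hkw], hmatch⟩
      · rintro (hm | ⟨hj, kw, hkw, hmatch⟩)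
        · exact Or.inl (Or.inl hm)
        · rcases List.mem_cons.mp hkw with rfl | hkw
          · exact Or.inl (Or.inr ⟨j, hj, hmatch, by omega⟩)
          · exact Or.inr ⟨hj, kw, hkw, hmatch⟩

-- the emitting pass is a filter, given that membership at i+d decides pvPred of tags[d]
theorem pvEmit_eq (matched : PySem.Set Nat) (ks : List String) (i : Nat) (tags : List String)
    (h : ∀ d : Nat, ∀ hd : d < tags.length,
        (PySem.Set.contains matched (i + d) = true ↔ pvPred ks tags[d] = true)) :
    pvEmit matched i tags = tags.filter (pvPred ks) := by
  induction tags generalizing i with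
  | nil => simp [pvEmit]
  | cons t rest ih =>
      have h0 := h 0 (by simp)
      simp only [Nat.add_zero, List.getElem_cons_zero] at h0
      have hrest : ∀ d : Nat, ∀ hd : d < rest.length,
          (PySem.Set.contains matched (i + 1 + d) = true ↔ pvPred ks rest[d] = true) := by
        intro d hd
        have := h (d + 1) (by simp only [List.length_cons]; omega)
        simpa [Nat.add_assoc, Nat.add_comm 1 d] using this
      rw [pvEmit, List.filter_cons]
      by_cases ht : pvPred ks t = true
      · rw [if_pos (h0.mpr ht), if_pos ht, ih (i + 1) hrest]
      · rw [if_neg (by simp_all), if_neg (by simp [ht]), ih (i + 1) hrest]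

-- ===== VERDICT =====
theorem extract_sports_related_tags_spec : Claim_equal_extract_sports_related_tags := by
  intro tags ks _
  unfold Spec_extract_sports_related_tags extract_sports_related_tags extract_sports_related_tags_alt
  have hB : pvEmit (ks.foldl (fun m keyword => pvScan (PySem.Str.lower keyword) m 0
        (tags.map PySem.Str.lower)) PySem.Set.empty) 0 tags = tags.filter (pvPred ks) := by
    apply pvEmit_eq
    intro d hd
    rw [PySem.Set.contains_iff, mem_matched]
    simp only [PySem.Set.empty, List.not_mem_nil, false_or, Nat.zero_add]
    constructor
    · rintro ⟨hj, k, hk, hmatch⟩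
      exact List.any_eq_true.mpr ⟨k, hk, by simpa using hmatch⟩
    · intro hp
      rcases List.any_eq_true.mp hp with ⟨k, hk, hmatch⟩
      exact ⟨by simpa using hd, k, hk, by simpa using hmatch⟩
  by_cases h : tags = []
  · simp [h, pvEmit]
  · simp only [h, pvFold_eq, List.nil_append, hB]
    simp
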